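-- pv_equiv track=rewrite | github.com/dainnida/Baekjoon_solved | 프로그래머스/2/42578. 의상/의상.py | solution
-- ===== SOURCE A (Python) =====
-- def solution(clothes):
--     dict = {}
--     for name, type in clothes:
--         if type in dict.keys():
--             # dict[type].append(name) # or dict[type] += [name]
--             dict[type] += 1
--         else:
--             # dict[type] = [name]
--             dict[type] = 1
--     answer = 1
--     for i in dict.values():
--         answer *= i + 1
--     return answer-1
-- ===== SOURCE B (Python) =====
-- def solution(clothes):
--     types = [c[1] for c in sorted(clothes, key=lambda c: c[1])]
--     answer = 1
--     while types:
--         t = types[0]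
--         run = 1
--         rest = types[1:]
--         while rest and rest[0] == t:
--             run += 1
--             rest = rest[1:]
--         answer *= run + 1
--         types = rest
--     return answer - 1
-- ===== Notes on version B (the rewrite author's own statement) =====
-- stated objective: alternative
-- what changed: Replaces the dict-based per-type counter with a sort by clothing type followed by a single run-length pass over the sorted type list, multiplying (run length + 1) per run.
import Mathlib
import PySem

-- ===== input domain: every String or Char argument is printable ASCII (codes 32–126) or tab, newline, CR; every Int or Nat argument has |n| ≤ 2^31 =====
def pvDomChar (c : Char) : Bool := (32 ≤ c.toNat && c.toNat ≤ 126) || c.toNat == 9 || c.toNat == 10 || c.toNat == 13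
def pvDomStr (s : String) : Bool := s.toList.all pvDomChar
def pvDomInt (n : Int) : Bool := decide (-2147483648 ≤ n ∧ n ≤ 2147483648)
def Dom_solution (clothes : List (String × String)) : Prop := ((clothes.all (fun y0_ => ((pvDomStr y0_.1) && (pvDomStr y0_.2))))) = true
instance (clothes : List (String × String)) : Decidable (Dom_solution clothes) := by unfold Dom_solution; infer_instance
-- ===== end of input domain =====

-- B changes the algorithm: sort by clothing type, then one run-length pass, instead of a dict counter (alternative, not faster).

-- ===== PORT A =====
def solution (clothes : List (String × String)) : Int :=
  ((clothes.foldl (fun d p =>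
      if d.contains p.2 then d.insert p.2 (d.getD p.2 0 + 1)
      else d.insert p.2 1) (PySem.Dict.empty)).values.foldl
    (fun a i => a * (i + 1)) 1) - 1

-- ===== PORT B =====
-- the outer 'while types:' loop of Source B, consuming one run of equal types per step
def runProd : List String → Int
  | [] => 1
  | t :: rest =>
      let run : Nat := (rest.takeWhile (fun x => x == t)).length + 1
      ((run : Int) + 1) * runProd (rest.dropWhile (fun x => x == t))
  termination_by L => L.length
  decreasing_by
    exact Nat.lt_succ_of_le (List.length_dropWhile_le _ _)

def solution_alt (clothes : List (String × String)) : Int :=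
  runProd ((PySem.List.sorted clothes (fun c => c.2) false).map (fun c => c.2)) - 1

-- ===== PRECONDITION & SPEC =====
def Spec_solution (clothes : List (String × String)) (out : Int) : Prop := out = solution_alt clothes
instance (clothes : List (String × String)) (out : Int) : Decidable (Spec_solution clothes out) := by unfold Spec_solution; infer_instance

-- ===== CLAIM (what is proved, stated in full; the proofs are below) =====
def Claim_equal_solution : Prop := ∀ (clothes : List (String × String)), Dom_solution clothes → Spec_solution clothes (solution clothes)

-- ===== LEMMAS AND PROOFS =====

lemma runProd_nil : runProd [] = 1 := by rw [runProd]

lemma runProd_cons (t : String) (rest : List String) :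
    runProd (t :: rest)
      = (((rest.takeWhile (fun x => x == t)).length + 1 : Nat) + 1)
        * runProd (rest.dropWhile (fun x => x == t)) := by
  rw [runProd]

-- A's loop body is exactly the counter step
lemma body_eq_counter_step :
    (fun (d : PySem.Dict String Int) (p : String × String) =>
      if d.contains p.2 then d.insert p.2 (d.getD p.2 0 + 1) else d.insert p.2 1)
    = (fun d p => d.insert p.2 (d.getD p.2 0 + 1)) := by
  funext d p
  by_cases h : d.contains p.2 = true
  · simp [h]
  · simp [h, PySem.Dict.getD_of_not_contains d 0 (by simpa using h)]

lemma foldl_mul_succ (l : List Int) (a : Int) :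
    l.foldl (fun a i => a * (i + 1)) a = a * (l.map (fun i => i + 1)).prod := by
  induction l generalizing a with
  | nil => simp
  | cons x xs ih => simp [List.foldl_cons, ih]; ring

-- the main characterisation of B's run-length pass on a sorted list
lemma runProd_eq_aux : ∀ (n : Nat) (L : List String), L.length ≤ n → L.Pairwise (· ≤ ·) →
    runProd L = ((PySem.Set.ofList L).map (fun t => ((L.count t : Int) + 1))).prod := by
  intro n
  induction n with
  | zero =>
      intro L hn _
      have : L = [] := List.eq_nil_of_length_eq_zero (Nat.le_zero.mp hn)
      subst this
      simp [runProd_nil, show PySem.Set.ofList ([] : List String) = [] from rfl]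
  | succ n ih =>
      intro L hn hp
      cases L with
      | nil => simp [runProd_nil, show PySem.Set.ofList ([] : List String) = [] from rfl]
      | cons t rest =>
        set tw := rest.takeWhile (fun x => x == t) with htw
        set dw := rest.dropWhile (fun x => x == t) with hdw
        have hsplit : tw ++ dw = rest := List.takeWhile_append_dropWhile
        have htw_all : ∀ x ∈ tw, x = t := by
          intro x hx
          rw [htw] at hx
          exact eq_of_beq (List.mem_takeWhile_imp (p := fun y => y == t) (l := rest) hx)
        have hrest_pw : rest.Pairwise (· ≤ ·) := (List.pairwise_cons.mp hp).2
        have ht_le : ∀ x ∈ rest, t ≤ x := (List.pairwise_cons.mp hp).1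
        have hdw_pw : dw.Pairwise (· ≤ ·) := hrest_pw.sublist (List.dropWhile_sublist _)
        have ht_notin_dw : t ∉ dw := by
          intro hmem
          cases hdwc : dw with
          | nil => simp [hdwc] at hmem
          | cons h' dw' =>
            have hh'ne : ¬ (h' == t) = true := by
              have := List.head?_dropWhile_not (fun x => x == t) rest
              rw [← hdw, hdwc] at this
              simpa using this
            have hh'ne' : h' ≠ t := fun h => hh'ne (beq_iff_eq.mpr h)
            have hh'mem : h' ∈ rest := (List.dropWhile_sublist _).mem (by rw [← hdw, hdwc]; simp)
            have hth'lt : t < h' := lt_of_le_of_ne (ht_le h' hh'mem) (Ne.symm hh'ne')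
            rw [hdwc] at hmem
            rcases List.mem_cons.mp hmem with h | h
            · exact hh'ne' h.symm
            · have : h' ≤ t := (List.pairwise_cons.mp (hdwc ▸ hdw_pw)).1 t h
              exact absurd (lt_of_lt_of_le hth'lt this) (lt_irrefl t)
        have hcount_tw : tw.count t = tw.length := by
          rw [List.count_eq_length]
          intro x hx; exact ((htw_all x hx).symm ▸ rfl)
        have hcount_t : (t :: rest).count t = tw.length + 1 := by
          rw [List.count_cons_self, ← hsplit, List.count_append,
            List.count_eq_zero.mpr ht_notin_dw, hcount_tw]
        have hcount_ne : ∀ x, x ≠ t → (t :: rest).count x = dw.count x := by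
          intro x hx
          rw [List.count_cons_of_ne (Ne.symm hx), ← hsplit, List.count_append,
            List.count_eq_zero.mpr (fun hmem => hx (htw_all x hmem))]
          simp
        -- the distinct types of L are, as a set, t plus those of dw
        have hperm : (PySem.Set.ofList (t :: rest)).Perm (t :: PySem.Set.ofList dw) := by
          rw [List.perm_ext_iff_of_nodup (PySem.Set.nodup_ofList _)
            (by simp [List.nodup_cons, PySem.Set.mem_ofList, ht_notin_dw, PySem.Set.nodup_ofList])]
          intro x
          simp only [PySem.Set.mem_ofList, List.mem_cons]
          constructor
          · rintro (h | h)
            · exact Or.inl h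
            · rw [← hsplit] at h
              rcases List.mem_append.mp h with h | h
              · exact Or.inl (htw_all x h)
              · exact Or.inr (by simpa [PySem.Set.mem_ofList] using h)
          · rintro (h | h)
            · exact Or.inl h
            · refine Or.inr ?_
              rw [← hsplit]
              exact List.mem_append.mpr (Or.inr (by simpa [PySem.Set.mem_ofList] using h))
        have hlen : dw.length ≤ n := by
          have h1 : dw.length ≤ rest.length := by
            rw [hdw]; exact List.length_dropWhile_le _ _
          have h2 : rest.length + 1 ≤ n + 1 := by simpa using hn
          omega
        have ihdw := ih dw hlen hdw_pw
        rw [runProd_cons, ← htw, ← hdw]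
        have hprod := List.Perm.prod_eq
          (List.Perm.map (fun t' => (((t :: rest).count t' : Int) + 1)) hperm)
        rw [hprod]
        simp only [List.map_cons, List.prod_cons]
        have hmapeq : (PySem.Set.ofList dw).map (fun t' => (((t :: rest).count t' : Int) + 1))
            = (PySem.Set.ofList dw).map (fun t' => ((dw.count t' : Int) + 1)) := by
          apply List.map_congr_left
          intro x hx
          have hxdw : x ∈ dw := (PySem.Set.mem_ofList _ _).mp hx
          have hxt : x ≠ t := fun h => ht_notin_dw (h ▸ hxdw)
          rw [hcount_ne x hxt]
        rw [hmapeq, ← ihdw, hcount_t]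

lemma runProd_eq (L : List String) (h : L.Pairwise (· ≤ ·)) :
    runProd L = ((PySem.Set.ofList L).map (fun t => ((L.count t : Int) + 1))).prod :=
  runProd_eq_aux L.length L (le_refl _) h

-- ===== VERDICT (by name: the statement is the Claim_ definition above) =====
theorem solution_spec : Claim_equal_solution := by
  intro clothes _
  unfold Spec_solution solution solution_alt
  set ts := clothes.map (fun c => c.2) with hts
  -- A side: the loop is Counter(ts)
  rw [body_eq_counter_step]
  have hfold : clothes.foldl (fun d p => d.insert p.2 (d.getD p.2 0 + 1)) PySem.Dict.empty
      = PySem.Dict.counter ts := by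
    rw [hts, ← PySem.Dict.foldl_insert_getD_add_one_eq_counter, List.foldl_map]
  rw [hfold]
  have hvalues : (PySem.Dict.counter ts).values
      = (PySem.Set.ofList ts).map (fun k => (ts.count k : Int)) := by
    show ((PySem.Dict.counter ts).items).map (fun p => p.2) = _
    rw [PySem.Dict.items_counter, List.map_map]
    rfl
  rw [hvalues, foldl_mul_succ, List.map_map, one_mul]
  -- B side
  set L := (PySem.List.sorted clothes (fun c => c.2) false).map (fun c => c.2) with hL
  have hLpw : L.Pairwise (· ≤ ·) := PySem.List.sorted_map_key_pairwise clothes (fun c => c.2)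
  have hLperm : L.Perm ts := List.Perm.map _ (PySem.List.sorted_perm clothes (fun c => c.2) false)
  rw [runProd_eq L hLpw]
  have hsetperm : (PySem.Set.ofList ts).Perm (PySem.Set.ofList L) := by
    rw [List.perm_ext_iff_of_nodup (PySem.Set.nodup_ofList _) (PySem.Set.nodup_ofList _)]
    intro x
    simp only [PySem.Set.mem_ofList]
    exact (hLperm.mem_iff).symm
  have hmapeq : (PySem.Set.ofList L).map (fun t => ((L.count t : Int) + 1))
      = (PySem.Set.ofList L).map (fun t => ((ts.count t : Int) + 1)) := by
    apply List.map_congr_left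
    intro x _
    rw [hLperm.count_eq]
  rw [hmapeq, List.Perm.prod_eq (List.Perm.map _ hsetperm)]
  rfl
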